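-- pv_equiv track=rewrite | github.com/zeeshanhxider/Postrgres_Ingestion_LegalAI | app/services/case_ingestor.py | _determine_section
-- ===== SOURCE A (Python) =====
-- def _determine_section(text: str) -> str:
--     """Determine what section this chunk represents"""
--     text_lower = text.lower()
--
--     # Common legal document sections
--     if any(word in text_lower for word in ['facts', 'background', 'procedural history']):
--         return 'FACTS'
--     elif any(word in text_lower for word in ['analysis', 'discussion', 'legal standard']):
--         return 'ANALYSIS'
--     elif any(word in text_lower for word in ['conclusion', 'holding', 'we conclude']):
--         return 'CONCLUSION'
--     elif any(word in text_lower for word in ['custody', 'parenting plan', 'residential time']):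
--         return 'CUSTODY'
--     elif any(word in text_lower for word in ['support', 'maintenance', 'alimony']):
--         return 'SUPPORT'
--     elif any(word in text_lower for word in ['property', 'assets', 'debt']):
--         return 'PROPERTY'
--     elif any(word in text_lower for word in ['attorney fees', 'costs']):
--         return 'FEES'
--     else:
--         return 'GENERAL'
-- ===== SOURCE B (Python) =====
-- _LABELS = ('FACTS', 'ANALYSIS', 'CONCLUSION', 'CUSTODY', 'SUPPORT', 'PROPERTY', 'FEES')
--
-- _KEYWORD_PRIORITY = {
--     'facts': 0, 'background': 0, 'procedural history': 0,
--     'analysis': 1, 'discussion': 1, 'legal standard': 1,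
--     'conclusion': 2, 'holding': 2, 'we conclude': 2,
--     'custody': 3, 'parenting plan': 3, 'residential time': 3,
--     'support': 4, 'maintenance': 4, 'alimony': 4,
--     'property': 5, 'assets': 5, 'debt': 5,
--     'attorney fees': 6, 'costs': 6,
-- }
--
-- def _determine_section(text: str) -> str:
--     """Collect ALL matching keywords, then select the highest-priority label."""
--     low = text.lower()
--     best = None
--     for kw, p in _KEYWORD_PRIORITY.items():
--         if kw in low:
--             best = p if best is None else min(best, p)
--     return 'GENERAL' if best is None else _LABELS[best]
-- ===== Notes on version B (the rewrite author's own statement) =====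
-- stated objective: alternative
-- what changed: Instead of a short-circuiting if/elif cascade over keyword groups, B scans every keyword exactly once, accumulates the minimum priority among ALL matches, and maps that minimum to its label (GENERAL if none matched); equal because the groups are listed in increasing priority, so the minimum matched priority is the first matching group.
import Mathlib
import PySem

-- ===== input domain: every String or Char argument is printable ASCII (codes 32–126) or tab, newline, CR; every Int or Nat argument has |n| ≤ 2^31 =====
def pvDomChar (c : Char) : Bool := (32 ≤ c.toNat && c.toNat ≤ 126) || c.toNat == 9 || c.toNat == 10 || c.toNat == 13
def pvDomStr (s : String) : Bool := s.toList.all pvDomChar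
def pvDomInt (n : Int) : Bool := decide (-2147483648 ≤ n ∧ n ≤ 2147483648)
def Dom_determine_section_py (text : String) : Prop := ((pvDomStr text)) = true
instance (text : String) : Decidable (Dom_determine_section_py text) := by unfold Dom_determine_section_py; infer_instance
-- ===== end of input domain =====

-- B replaces the short-circuiting if/elif cascade by a single scan over all keywords that
-- accumulates the minimum matched priority, then maps it to its label (alternative algorithm).


-- ===== PORT A =====
def determine_section_py (text : String) : String :=
  let text_lower := PySem.Str.lower text
  if ["facts", "background", "procedural history"].any (fun w => PySem.Str.isIn w text_lower) then "FACTS"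
  else if ["analysis", "discussion", "legal standard"].any (fun w => PySem.Str.isIn w text_lower) then "ANALYSIS"
  else if ["conclusion", "holding", "we conclude"].any (fun w => PySem.Str.isIn w text_lower) then "CONCLUSION"
  else if ["custody", "parenting plan", "residential time"].any (fun w => PySem.Str.isIn w text_lower) then "CUSTODY"
  else if ["support", "maintenance", "alimony"].any (fun w => PySem.Str.isIn w text_lower) then "SUPPORT"
  else if ["property", "assets", "debt"].any (fun w => PySem.Str.isIn w text_lower) then "PROPERTY"
  else if ["attorney fees", "costs"].any (fun w => PySem.Str.isIn w text_lower) then "FEES"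
  else "GENERAL"

-- ===== PORT B =====
def labelsB : List String :=
  ["FACTS", "ANALYSIS", "CONCLUSION", "CUSTODY", "SUPPORT", "PROPERTY", "FEES"]

-- _KEYWORD_PRIORITY dict (insertion-order association list)
def keywordPriority : List (String × Nat) :=
  [("facts", 0), ("background", 0), ("procedural history", 0),
   ("analysis", 1), ("discussion", 1), ("legal standard", 1),
   ("conclusion", 2), ("holding", 2), ("we conclude", 2),
   ("custody", 3), ("parenting plan", 3), ("residential time", 3),
   ("support", 4), ("maintenance", 4), ("alimony", 4),
   ("property", 5), ("assets", 5), ("debt", 5),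
   ("attorney fees", 6), ("costs", 6)]

-- loop body: best = p if best is None else min(best, p)  (when kw in low)
def stepB (low : String) (best : Option Nat) (p : String × Nat) : Option Nat :=
  if PySem.Str.isIn p.1 low then
    match best with
    | none => some p.2
    | some b => some (Nat.min b p.2)
  else best

def determine_section_py_alt (text : String) : String :=
  let low := PySem.Str.lower text
  let best := keywordPriority.foldl (stepB low) none
  match best with
  | none => "GENERAL"
  | some b => labelsB.getD b "GENERAL"

-- ===== PRECONDITION & SPEC =====
def Spec_determine_section_py (text : String) (out : String) : Prop := out = determine_section_py_alt text
instance (text : String) (out : String) : Decidable (Spec_determine_section_py text out) := by unfold Spec_determine_section_py; infer_instance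

-- ===== CLAIM =====
def Claim_equal_determine_section_py : Prop := ∀ (text : String), Dom_determine_section_py text → Spec_determine_section_py text (determine_section_py text)

-- ===== LEMMAS AND PROOFS =====

-- "best = p if best is None else min(best, p)"
def optIns (best : Option Nat) (k : Nat) : Option Nat :=
  match best with
  | none => some k
  | some b => some (Nat.min b k)

theorem optIns_idem (a : Option Nat) (k : Nat) : optIns (optIns a k) k = optIns a k := by
  cases a <;> simp [optIns]

-- folding stepB over a group of keywords sharing one priority k inserts k iff any keyword matches
theorem foldl_step_group (low : String) (ws : List String) (k : Nat) (acc : Option Nat) :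
    (ws.map (fun w => (w, k))).foldl (stepB low) acc =
      if ws.any (fun w => PySem.Str.isIn w low) then optIns acc k else acc := by
  induction ws generalizing acc with
  | nil => simp
  | cons w ws ih =>
    simp only [List.map_cons, List.foldl_cons, List.any_cons]
    by_cases h : PySem.Str.isIn w low = true
    · have hs : stepB low acc (w, k) = optIns acc k := by
        simp only [stepB, optIns, h, if_pos]
      rw [hs, ih]
      simp only [h, Bool.true_or, if_true]
      cases hb : ws.any (fun w => PySem.Str.isIn w low) <;>
        simp [optIns_idem]
    · have h' : PySem.Str.isIn w low = false := by
        simpa using h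
      have hs : stepB low acc (w, k) = acc := by
        simp only [stepB, h', Bool.false_eq_true, if_false]
      rw [hs, ih]
      simp only [h', Bool.false_or]

theorem keywordPriority_groups :
    keywordPriority =
      (["facts", "background", "procedural history"].map (fun w => (w, 0))) ++
      (["analysis", "discussion", "legal standard"].map (fun w => (w, 1))) ++
      (["conclusion", "holding", "we conclude"].map (fun w => (w, 2))) ++
      (["custody", "parenting plan", "residential time"].map (fun w => (w, 3))) ++
      (["support", "maintenance", "alimony"].map (fun w => (w, 4))) ++
      (["property", "assets", "debt"].map (fun w => (w, 5))) ++
      (["attorney fees", "costs"].map (fun w => (w, 6))) := rfl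

-- ===== VERDICT =====
theorem determine_section_py_spec : Claim_equal_determine_section_py := by
  intro text _
  unfold Spec_determine_section_py determine_section_py determine_section_py_alt
  rw [keywordPriority_groups]
  simp only [List.foldl_append, foldl_step_group]
  split_ifs <;> rfl
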